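-- pv_equiv track=rewrite | github.com/Sakshisharma1616/Laundry-Order-Management-System | helpers.py | filter_orders
-- ===== SOURCE A (Python) =====
-- def filter_orders(
--     orders: list[dict],
--     status: str | None,
--     customer_name: str | None,
--     phone: str | None,
-- ) -> list[dict]:
--     """Return orders that satisfy all provided filters simultaneously.
--
--     Filter semantics:
--     - status: exact match
--     - customer_name: case-insensitive substring match
--     - phone: exact match
--     - A None value for any filter means that filter is not applied.
--
--     Args:
--         orders: All orders to search through.
--         status: Optional status filter.
--         customer_name: Optional customer name filter.
--         phone: Optional phone filter.
--
--     Returns: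
--         Subset of orders matching every non-None filter.
--     """
--     return [
--         order for order in orders
--         if _matches_status(order, status)
--         and _matches_customer_name(order, customer_name)
--         and _matches_phone(order, phone)
--     ]
--
-- def _matches_status(order: dict, status: str | None) -> bool:
--     """Return True if the order matches the status filter (or no filter is set)."""
--     return status is None or order["status"] == status
--
-- def _matches_customer_name(order: dict, customer_name: str | None) -> bool:
--     """Return True if the order matches the customer_name filter (case-insensitive substring)."""
--     return customer_name is None or customer_name.lower() in order["customer_name"].lower()
--
-- def _matches_phone(order: dict, phone: str | None) -> bool:
--     """Return True if the order matches the phone filter (exact match)."""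
--     return phone is None or order["phone"] == phone
-- ===== SOURCE B (Python) =====
-- def filter_orders(
--     orders: list[dict],
--     status: str | None,
--     customer_name: str | None,
--     phone: str | None,
-- ) -> list[dict]:
--     """Staged filtering: apply each active filter as its own narrowing pass."""
--     result = orders
--     if status is not None:
--         result = [o for o in result if o["status"] == status]
--     if customer_name is not None:
--         needle = customer_name.lower()
--         result = [o for o in result if needle in o["customer_name"].lower()]
--     if phone is not None:
--         result = [o for o in result if o["phone"] == phone]
--     return result
-- ===== Notes on version B (the rewrite author's own statement) =====
-- stated objective: simpler
-- what changed: A's single pass testing each order against a conjunction of three helper predicates is replaced by staged filtering: start from the whole list and apply each active filter as its own narrowing comprehension pass, with no helper functions.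
import Mathlib
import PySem

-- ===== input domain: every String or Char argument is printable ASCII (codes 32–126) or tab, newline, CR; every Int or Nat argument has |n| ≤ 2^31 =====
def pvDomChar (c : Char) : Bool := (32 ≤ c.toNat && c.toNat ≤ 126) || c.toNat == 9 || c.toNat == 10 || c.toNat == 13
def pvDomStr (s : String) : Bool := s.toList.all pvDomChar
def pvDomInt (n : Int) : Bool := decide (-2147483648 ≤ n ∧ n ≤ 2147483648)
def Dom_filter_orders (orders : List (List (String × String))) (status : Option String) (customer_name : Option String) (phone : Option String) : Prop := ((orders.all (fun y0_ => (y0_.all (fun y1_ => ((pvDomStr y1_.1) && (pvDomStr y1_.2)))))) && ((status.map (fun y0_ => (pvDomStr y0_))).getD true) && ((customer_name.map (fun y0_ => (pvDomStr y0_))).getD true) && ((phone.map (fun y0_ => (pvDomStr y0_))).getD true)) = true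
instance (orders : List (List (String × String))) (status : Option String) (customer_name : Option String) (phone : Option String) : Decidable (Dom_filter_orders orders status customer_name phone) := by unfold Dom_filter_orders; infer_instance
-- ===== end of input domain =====

-- B replaces A's single pass with per-order conjunction of three helper predicates by up to
-- three sequential narrowing passes, one per active filter (objective: simpler, no helpers).

-- ===== PORT A =====
-- order["k"]: on a missing key Python raises KeyError; the port defaults to "" there, and
-- Pre_filter_orders excludes exactly the inputs on which Python reaches a missing key.
def pvAmatchesStatus (order : List (String × String)) (status : Option String) : Bool :=
  match status with
  | none => true
  | some s => ((PySem.Dict.mk order).get? "status").getD "" == s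

def pvAmatchesCustomerName (order : List (String × String)) (customer_name : Option String) : Bool :=
  match customer_name with
  | none => true
  | some c =>
      PySem.Str.isIn (PySem.Str.lower c)
        (PySem.Str.lower (((PySem.Dict.mk order).get? "customer_name").getD ""))

def pvAmatchesPhone (order : List (String × String)) (phone : Option String) : Bool :=
  match phone with
  | none => true
  | some p => ((PySem.Dict.mk order).get? "phone").getD "" == p

def filter_orders (orders : List (List (String × String))) (status : Option String) (customer_name : Option String) (phone : Option String) : List (List (String × String)) :=
  orders.filter (fun order =>
    pvAmatchesStatus order status
      && pvAmatchesCustomerName order customer_name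
      && pvAmatchesPhone order phone)

-- ===== PORT B =====
-- staged filtering (Source B): result starts as orders, each active filter narrows it in its own pass
def filter_orders_alt (orders : List (List (String × String))) (status : Option String) (customer_name : Option String) (phone : Option String) : List (List (String × String)) :=
  let r1 :=
    match status with
    | none => orders
    | some s => orders.filter (fun o => ((PySem.Dict.mk o).get? "status").getD "" == s)
  let r2 :=
    match customer_name with
    | none => r1
    | some c =>
        let needle := PySem.Str.lower c
        r1.filter (fun o =>
          PySem.Str.isIn needle (PySem.Str.lower (((PySem.Dict.mk o).get? "customer_name").getD "")))
  match phone with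
  | none => r2
  | some p => r2.filter (fun o => ((PySem.Dict.mk o).get? "phone").getD "" == p)

-- ===== PRECONDITION & SPEC =====
-- Pre_ excludes exactly the inputs on which Python A raises KeyError: some order, evaluated
-- under A's short-circuit order (status, then customer_name, then phone), reaches an active
-- filter whose key it lacks. Python B raises on exactly the same inputs (possibly naming a
-- different key), so nothing on which either program returns is excluded.
def pvKeyMissing (o : List (String × String)) (f : Option String) (k : String) : Bool :=
  f.isSome && ((PySem.Dict.mk o).get? k).isNone

def pvStatusPasses (o : List (String × String)) (status : Option String) : Bool :=
  match status with
  | none => true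
  | some s => (PySem.Dict.mk o).get? "status" == some s

def pvNamePasses (o : List (String × String)) (customer_name : Option String) : Bool :=
  match customer_name with
  | none => true
  | some c =>
      match (PySem.Dict.mk o).get? "customer_name" with
      | none => false
      | some v => PySem.Str.isIn (PySem.Str.lower c) (PySem.Str.lower v)

def Pre_filter_orders (orders : List (List (String × String))) (status : Option String) (customer_name : Option String) (phone : Option String) : Prop :=
  ∀ o ∈ orders,
    pvKeyMissing o status "status" = false
    ∧ (pvStatusPasses o status = true → pvKeyMissing o customer_name "customer_name" = false)
    ∧ (pvStatusPasses o status = true → pvNamePasses o customer_name = true →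
        pvKeyMissing o phone "phone" = false)

instance (orders : List (List (String × String))) (status : Option String) (customer_name : Option String) (phone : Option String) : Decidable (Pre_filter_orders orders status customer_name phone) := by unfold Pre_filter_orders; infer_instance

def pvWitness_filter_orders : (List (List (String × String))) × Option String × Option String × Option String :=
  ([[("status", "done"), ("customer_name", "Ann B"), ("phone", "123")],
    [("status", "new"), ("customer_name", "Bob"), ("phone", "7")]],
   some "done", some "ann", none)

def Spec_filter_orders (orders : List (List (String × String))) (status : Option String) (customer_name : Option String) (phone : Option String) (out : List (List (String × String))) : Prop := out = filter_orders_alt orders status customer_name phone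
instance (orders : List (List (String × String))) (status : Option String) (customer_name : Option String) (phone : Option String) (out : List (List (String × String))) : Decidable (Spec_filter_orders orders status customer_name phone out) := by unfold Spec_filter_orders; infer_instance

-- ===== CLAIM (what is proved, stated in full; the proofs are below) =====
def Claim_equal_filter_orders : Prop := ∀ (orders : List (List (String × String))) (status : Option String) (customer_name : Option String) (phone : Option String), Dom_filter_orders orders status customer_name phone → Pre_filter_orders orders status customer_name phone → Spec_filter_orders orders status customer_name phone (filter_orders orders status customer_name phone)

-- ===== LEMMAS AND PROOFS =====

-- ===== VERDICT (by name: the statement is the Claim_ definition above) =====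
theorem filter_orders_spec : Claim_equal_filter_orders := by
  intro orders status customer_name phone _ _
  unfold Spec_filter_orders filter_orders filter_orders_alt
  cases status <;> cases customer_name <;> cases phone <;>
    simp [pvAmatchesStatus, pvAmatchesCustomerName, pvAmatchesPhone, List.filter_filter,
      Bool.and_comm, Bool.and_left_comm]
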